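-- pv_equiv track=rewrite | github.com/moon23k/Dialog_Character | setup.py | split_dialog
-- ===== SOURCE A (Python) =====
-- def split_dialog(script, char):
--     dialog = []
--     prior_char, prior_uttr = '', ''
--
--     for dial in script:
--         for line in dial['dialogue']:
--             curr_char = line.split(':')[0].lower().strip()
--             curr_uttr = ''.join(line.split(':')[1:]).strip()
--
--             if not prior_char:
--                 if curr_char == char:
--                     continue
--
--                 prior_char = curr_char
--                 prior_uttr = curr_uttr
--                 continue
--
--             if prior_char != char and curr_char == char:
--                 temp = dict()
--                 temp['uttr'] = prior_uttr.lower()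
--                 temp['resp'] = curr_uttr.lower()
--
--                 dialog.append(temp)
--
--             prior_char = curr_char
--             prior_uttr = curr_uttr
--
--     return dialog
-- ===== SOURCE B (Python) =====
-- def split_dialog(script, char):
--     flat = []
--     for dial in script:
--         for line in dial['dialogue']:
--             parts = line.split(':')
--             flat.append((parts[0].lower().strip(), ''.join(parts[1:]).strip()))
--     return [{'uttr': pu.lower(), 'resp': cu.lower()}
--             for (pc, pu), (cc, cu) in zip(flat, flat[1:])
--             if pc and pc != char and cc == char]
-- ===== Notes on version B (the rewrite author's own statement) =====
-- stated objective: alternative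
-- what changed: B replaces A's stateful prior-character tracking loop with a two-phase pipeline: first flatten and parse all lines into (speaker, utterance) pairs, then select pairs from zip(flat, flat[1:]) whose guard holds.
import Mathlib
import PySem

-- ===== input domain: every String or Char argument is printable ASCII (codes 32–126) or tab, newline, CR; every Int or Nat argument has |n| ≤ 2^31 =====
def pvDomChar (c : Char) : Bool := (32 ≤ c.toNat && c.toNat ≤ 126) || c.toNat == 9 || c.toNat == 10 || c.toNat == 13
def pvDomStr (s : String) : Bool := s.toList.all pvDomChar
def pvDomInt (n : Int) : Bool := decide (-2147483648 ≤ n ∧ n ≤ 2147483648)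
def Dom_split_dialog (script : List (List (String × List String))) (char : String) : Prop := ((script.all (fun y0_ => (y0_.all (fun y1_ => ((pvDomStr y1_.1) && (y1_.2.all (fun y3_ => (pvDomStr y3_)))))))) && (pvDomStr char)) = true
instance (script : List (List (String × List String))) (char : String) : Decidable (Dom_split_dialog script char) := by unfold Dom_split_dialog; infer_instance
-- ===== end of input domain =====

-- B replaces A's stateful prior-speaker tracking by a flatten-parse-then-zip-consecutive-pairs pipeline (alternative decomposition, same cost; return values proved equal).


-- ===== PORT A =====
-- literal transliteration of A: one pass keeping (dialog, prior_char, prior_uttr) as fold state.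
-- the separator ':' is nonempty, so split? is always some (.getD [] never fires) and the result is nonempty ([0] ported as .headD "" never defaults).
def split_dialog (script : List (List (String × List String))) (char : String) : List (List (String × String)) :=
  (script.foldl (fun (st : List (List (String × String)) × String × String) dial =>
      ((dial.lookup "dialogue").getD []).foldl (fun st line =>
        let curr_char := PySem.Str.strip (PySem.Str.lower (((PySem.Str.split? line ":").getD []).headD ""))
        let curr_uttr := PySem.Str.strip (PySem.Str.join "" (((PySem.Str.split? line ":").getD []).drop 1))
        if st.2.1 = "" then
          if curr_char = char then st
          else (st.1, curr_char, curr_uttr)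
        else
          ((if st.2.1 ≠ char ∧ curr_char = char then
              st.1 ++ [[("uttr", PySem.Str.lower st.2.2), ("resp", PySem.Str.lower curr_uttr)]]
            else st.1), curr_char, curr_uttr)) st)
    ([], "", "")).1

-- ===== PORT B =====
-- parse one line into (speaker, utterance)
def pvParse (line : String) : String × String :=
  let parts := (PySem.Str.split? line ":").getD []
  (PySem.Str.strip (PySem.Str.lower (parts.headD "")),
   PySem.Str.strip (PySem.Str.join "" (parts.drop 1)))

def split_dialog_alt (script : List (List (String × List String))) (char : String) : List (List (String × String)) :=
  let flat := script.flatMap (fun dial => ((dial.lookup "dialogue").getD []).map pvParse)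
  (flat.zip (flat.drop 1)).filterMap (fun pr =>
    if pr.1.1 ≠ "" ∧ pr.1.1 ≠ char ∧ pr.2.1 = char then
      some [("uttr", PySem.Str.lower pr.1.2), ("resp", PySem.Str.lower pr.2.2)]
    else none)

-- ===== PRECONDITION & SPEC =====
-- Pre_ excludes exactly the inputs where Python A raises KeyError: a dial dict without the key 'dialogue'.
def Pre_split_dialog (script : List (List (String × List String))) (char : String) : Prop :=
  ∀ dial ∈ script, (dial.lookup "dialogue").isSome = true
instance (script : List (List (String × List String))) (char : String) : Decidable (Pre_split_dialog script char) := by unfold Pre_split_dialog; infer_instance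
def pvWitness_split_dialog : (List (List (String × List String))) × String :=
  ([[("dialogue", ["Bob: hi there", "alice: yo", "bob:ok"])]], "alice")
def Spec_split_dialog (script : List (List (String × List String))) (char : String) (out : List (List (String × String))) : Prop := out = split_dialog_alt script char
instance (script : List (List (String × List String))) (char : String) (out : List (List (String × String))) : Decidable (Spec_split_dialog script char out) := by unfold Spec_split_dialog; infer_instance

-- ===== CLAIM (what is proved, stated in full; the proofs are below) =====
def Claim_equal_split_dialog : Prop := ∀ (script : List (List (String × List String))) (char : String), Dom_split_dialog script char → Pre_split_dialog script char → Spec_split_dialog script char (split_dialog script char)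

-- ===== LEMMAS AND PROOFS =====

def pvPair (pu cu : String) : List (String × String) :=
  [("uttr", PySem.Str.lower pu), ("resp", PySem.Str.lower cu)]

-- A's loop body on an already-parsed line
def pvStepA (char : String) (st : List (List (String × String)) × String × String)
    (p : String × String) : List (List (String × String)) × String × String :=
  if st.2.1 = "" then
    if p.1 = char then st else (st.1, p.1, p.2)
  else
    ((if st.2.1 ≠ char ∧ p.1 = char then st.1 ++ [pvPair st.2.2 p.2] else st.1), p.1, p.2)

-- the pairs B selects, as a recursion carrying the (optional) previous parsed line
def pvPairs (char : String) : Option (String × String) → List (String × String) → List (List (String × String))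
  | _, [] => []
  | none, p :: rest => pvPairs char (some p) rest
  | some q, p :: rest =>
      (if q.1 ≠ "" ∧ q.1 ≠ char ∧ p.1 = char then [pvPair q.2 p.2] else []) ++
        pvPairs char (some p) rest

-- bisimulation relation between A's prior state and B's previous-line state:
-- either they are literally the same line, or both are "dead" (can never trigger an append)
def pvR (char pc : String) (prev : Option (String × String)) (pu : String) : Prop :=
  prev = some (pc, pu) ∨
    ((pc = "" ∨ pc = char) ∧ (prev = none ∨ ∃ q, prev = some q ∧ (q.1 = "" ∨ q.1 = char)))

lemma pvInv (char : String) (L : List (String × String)) :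
    ∀ (acc : List (List (String × String))) (pc pu : String) (prev : Option (String × String)),
    pvR char pc prev pu →
    (L.foldl (pvStepA char) (acc, pc, pu)).1 = acc ++ pvPairs char prev L := by
  induction L with
  | nil => intro acc pc pu prev _; cases prev <;> simp [pvPairs]
  | cons p rest ih =>
    rintro acc pc pu prev (h | ⟨hpc, hprev⟩)
    · subst h
      by_cases hpcE : pc = ""
      · by_cases hc : p.1 = char
        · have : (List.foldl (pvStepA char) (acc, pc, pu) (p :: rest)).1
              = (rest.foldl (pvStepA char) (acc, pc, pu)).1 := by
            simp [List.foldl_cons, pvStepA, hpcE, hc]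
          rw [this, ih acc pc pu (some p) (Or.inr ⟨Or.inl hpcE, Or.inr ⟨p, rfl, Or.inr hc⟩⟩)]
          simp [pvPairs, hpcE]
        · have : (List.foldl (pvStepA char) (acc, pc, pu) (p :: rest)).1
              = (rest.foldl (pvStepA char) (acc, p.1, p.2)).1 := by
            simp [List.foldl_cons, pvStepA, hpcE, hc]
          rw [this, ih acc p.1 p.2 (some p) (Or.inl rfl)]
          simp [pvPairs, hpcE]
      · by_cases hg : pc ≠ char ∧ p.1 = char
        · have : (List.foldl (pvStepA char) (acc, pc, pu) (p :: rest)).1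
              = (rest.foldl (pvStepA char) (acc ++ [pvPair pu p.2], p.1, p.2)).1 := by
            simp [List.foldl_cons, pvStepA, hpcE, hg]
          rw [this, ih _ p.1 p.2 (some p) (Or.inl rfl)]
          simp [pvPairs, hpcE, hg]
        · have : (List.foldl (pvStepA char) (acc, pc, pu) (p :: rest)).1
              = (rest.foldl (pvStepA char) (acc, p.1, p.2)).1 := by
            simp [List.foldl_cons, pvStepA, hpcE, hg]
          rw [this, ih acc p.1 p.2 (some p) (Or.inl rfl)]
          have : ¬ (pc ≠ "" ∧ pc ≠ char ∧ p.1 = char) := by tauto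
          simp [pvPairs, this]
    · -- dead state: no pair is emitted, by either side
      have hnopair : pvPairs char prev (p :: rest) = pvPairs char (some p) rest := by
        rcases hprev with h | ⟨q, hq, hqd⟩
        · subst h; simp [pvPairs]
        · subst hq
          have : ¬ (q.1 ≠ "" ∧ q.1 ≠ char ∧ p.1 = char) := by tauto
          simp [pvPairs, this]
      rw [hnopair]
      by_cases hpcE : pc = ""
      · by_cases hc : p.1 = char
        · have : (List.foldl (pvStepA char) (acc, pc, pu) (p :: rest)).1
              = (rest.foldl (pvStepA char) (acc, pc, pu)).1 := by
            simp [List.foldl_cons, pvStepA, hpcE, hc]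
          rw [this, ih acc pc pu (some p) (Or.inr ⟨Or.inl hpcE, Or.inr ⟨p, rfl, Or.inr hc⟩⟩)]
        · have : (List.foldl (pvStepA char) (acc, pc, pu) (p :: rest)).1
              = (rest.foldl (pvStepA char) (acc, p.1, p.2)).1 := by
            simp [List.foldl_cons, pvStepA, hpcE, hc]
          rw [this, ih acc p.1 p.2 (some p) (Or.inl rfl)]
      · have hpcc : pc = char := by tauto
        have hch : ¬ char = "" := hpcc ▸ hpcE
        have : (List.foldl (pvStepA char) (acc, pc, pu) (p :: rest)).1
            = (rest.foldl (pvStepA char) (acc, p.1, p.2)).1 := by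
          simp [List.foldl_cons, pvStepA, hpcc, hch]
        rw [this, ih acc p.1 p.2 (some p) (Or.inl rfl)]

-- A's nested loop over script equals the single fold of pvStepA over the flattened parsed lines
lemma pvA_flatten (char : String) (script : List (List (String × List String)))
    (st : List (List (String × String)) × String × String) :
    script.foldl (fun st dial =>
      ((dial.lookup "dialogue").getD []).foldl (fun st line =>
        let curr_char := PySem.Str.strip (PySem.Str.lower (((PySem.Str.split? line ":").getD []).headD ""))
        let curr_uttr := PySem.Str.strip (PySem.Str.join "" (((PySem.Str.split? line ":").getD []).drop 1))
        if st.2.1 = "" then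
          if curr_char = char then st
          else (st.1, curr_char, curr_uttr)
        else
          ((if st.2.1 ≠ char ∧ curr_char = char then
              st.1 ++ [[("uttr", PySem.Str.lower st.2.2), ("resp", PySem.Str.lower curr_uttr)]]
            else st.1), curr_char, curr_uttr)) st) st
    = (script.flatMap (fun dial => ((dial.lookup "dialogue").getD []).map pvParse)).foldl
        (pvStepA char) st := by
  induction script generalizing st with
  | nil => simp
  | cons d s ih =>
    simp only [List.foldl_cons, List.flatMap_cons, List.foldl_append, ih, List.foldl_map]
    apply PySem.List.foldl_congr_mem
    intro st' line _
    simp [pvStepA]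

lemma pvB_zip (char : String) (x : String × String) (L : List (String × String)) :
    ((x :: L).zip L).filterMap (fun pr =>
        if pr.1.1 ≠ "" ∧ pr.1.1 ≠ char ∧ pr.2.1 = char then
          some [("uttr", PySem.Str.lower pr.1.2), ("resp", PySem.Str.lower pr.2.2)]
        else none)
      = pvPairs char (some x) L := by
  induction L generalizing x with
  | nil => simp [pvPairs]
  | cons y rest ih =>
    simp only [List.zip_cons_cons, List.filterMap_cons, ih y]
    by_cases h : x.1 ≠ "" ∧ x.1 ≠ char ∧ y.1 = char <;> simp [pvPairs, h, pvPair]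

lemma pvB_eq (char : String) (script : List (List (String × List String))) :
    split_dialog_alt script char
      = pvPairs char none
          (script.flatMap (fun dial => ((dial.lookup "dialogue").getD []).map pvParse)) := by
  unfold split_dialog_alt
  cases h : script.flatMap (fun dial => ((dial.lookup "dialogue").getD []).map pvParse) with
  | nil => simp [pvPairs]
  | cons x L => simp only [List.drop_one, List.tail_cons, pvB_zip, pvPairs]

-- ===== VERDICT (by name: the statement is the Claim_ definition above) =====
theorem split_dialog_spec : Claim_equal_split_dialog := by
  intro script char _ _
  unfold Spec_split_dialog
  rw [pvB_eq]
  unfold split_dialog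
  rw [pvA_flatten]
  rw [pvInv char _ [] "" "" none (Or.inr ⟨Or.inl rfl, Or.inl rfl⟩)]
  simp
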